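-- pv_equiv track=rewrite | github.com/AutobookNft/NATAN_LOC | python_ai_service/app/services/rag_fortress/pipeline.py | _extract_date_range_from_evidences
-- ===== SOURCE A (Python) =====
-- from typing import Dict, Optional, List, Any
--
-- def _extract_date_range_from_evidences(evidences: List[Dict]) -> str:
--     """
--     Estrae range temporale dalle date dei documenti.
--
--     Returns:
--         Stringa range (es: "Gen 2024 - Nov 2025")
--     """
--     dates = []
--     for ev in evidences:
--         date = ev.get("protocol_date", "")
--         if date:
--             # Prova a parsare la data
--             try:
--                 # Formato atteso: DD/MM/YYYY o YYYY-MM-DD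
--                 if "/" in date:
--                     parts = date.split("/")
--                     if len(parts) == 3:
--                         dates.append(f"{parts[2]}-{parts[1]}")
--                 elif "-" in date:
--                     parts = date.split("-")
--                     if len(parts) >= 2:
--                         dates.append(f"{parts[0]}-{parts[1]}")
--             except:
--                 pass
--
--     if not dates:
--         return "2024-2025"
--
--     dates.sort()
--     if len(dates) == 1:
--         return dates[0]
--     return f"{dates[0]} - {dates[-1]}"
-- ===== SOURCE B (Python) =====
-- def _month_key(ev):
--     """Return the 'YYYY-MM' key for one evidence, or None if it has no parsable date."""
--     date = ev.get("protocol_date", "")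
--     if date:
--         if "/" in date:
--             parts = date.split("/")
--             if len(parts) == 3:
--                 return f"{parts[2]}-{parts[1]}"
--         elif "-" in date:
--             parts = date.split("-")
--             if len(parts) >= 2:
--                 return f"{parts[0]}-{parts[1]}"
--     return None
--
--
-- def _extract_date_range_from_evidences(evidences):
--     # Single pass keeping running endpoints instead of collecting + sorting.
--     count = 0
--     lo = None
--     hi = None
--     for ev in evidences:
--         key = _month_key(ev)
--         if key is not None:
--             count += 1
--             lo = key if lo is None else min(lo, key)
--             hi = key if hi is None else max(hi, key)
--     if count == 0:
--         return "2024-2025"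
--     if count == 1:
--         return lo
--     return f"{lo} - {hi}"
-- ===== Notes on version B (the rewrite author's own statement) =====
-- stated objective: simpler
-- what changed: Instead of collecting all parsed 'YYYY-MM' keys into a list, sorting it and indexing its ends, B makes a single pass keeping a running count and running min/max endpoints and formats the result from those.
import Mathlib
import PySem

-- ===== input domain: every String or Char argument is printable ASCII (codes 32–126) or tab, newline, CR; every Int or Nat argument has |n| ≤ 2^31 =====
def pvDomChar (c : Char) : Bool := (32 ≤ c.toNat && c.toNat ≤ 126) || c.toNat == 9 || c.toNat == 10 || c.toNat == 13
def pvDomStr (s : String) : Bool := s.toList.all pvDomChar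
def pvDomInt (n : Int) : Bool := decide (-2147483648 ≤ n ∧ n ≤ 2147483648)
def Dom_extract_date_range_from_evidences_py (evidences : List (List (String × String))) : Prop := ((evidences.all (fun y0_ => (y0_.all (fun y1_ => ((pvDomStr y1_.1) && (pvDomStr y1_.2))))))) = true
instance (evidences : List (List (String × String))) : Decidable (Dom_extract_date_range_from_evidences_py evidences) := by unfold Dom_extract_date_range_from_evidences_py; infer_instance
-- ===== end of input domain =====

-- B replaces A's collect-all-then-sort with a single pass maintaining running min/max endpoints and a count (alternative/simpler; same parsing of each date).

-- ===== PORT A =====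
-- loop body of A's 'for ev in evidences' (appends the formatted key, if any, to dates)
def pvStepA (dates : List String) (ev : List (String × String)) : List String :=
  let date := (PySem.Dict.ofList ev).getD "protocol_date" ""
  if date = "" then dates
  else if PySem.Str.isIn "/" date then
    match PySem.Str.split? date "/" with
    | some parts =>
        if parts.length = 3 then
          dates ++ [PySem.Str.join "" [PySem.List.pyGetD parts 2 "", "-", PySem.List.pyGetD parts 1 ""]]
        else dates
    | none => dates
  else if PySem.Str.isIn "-" date then
    match PySem.Str.split? date "-" with
    | some parts =>
        if 2 ≤ parts.length then
          dates ++ [PySem.Str.join "" [PySem.List.pyGetD parts 0 "", "-", PySem.List.pyGetD parts 1 ""]]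
        else dates
    | none => dates
  else dates

def extract_date_range_from_evidences_py (evidences : List (List (String × String))) : String :=
  let dates := evidences.foldl pvStepA []
  if dates = [] then "2024-2025"
  else
    let dates2 := PySem.List.sorted dates (fun x => x) false
    if dates2.length = 1 then PySem.List.pyGetD dates2 0 ""
    else PySem.Str.join "" [PySem.List.pyGetD dates2 0 "", " - ", PySem.List.pyGetD dates2 (-1) ""]

-- ===== PORT B =====
-- Source B's helper _month_key
def pvKeyB (ev : List (String × String)) : Option String :=
  let date := (PySem.Dict.ofList ev).getD "protocol_date" ""
  if date = "" then none
  else if PySem.Str.isIn "/" date then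
    match PySem.Str.split? date "/" with
    | some parts =>
        if parts.length = 3 then
          some (PySem.Str.join "" [PySem.List.pyGetD parts 2 "", "-", PySem.List.pyGetD parts 1 ""])
        else none
    | none => none
  else if PySem.Str.isIn "-" date then
    match PySem.Str.split? date "-" with
    | some parts =>
        if 2 ≤ parts.length then
          some (PySem.Str.join "" [PySem.List.pyGetD parts 0 "", "-", PySem.List.pyGetD parts 1 ""])
        else none
    | none => none
  else none

-- loop body of B's single pass: state (count, lo, hi)
def pvStepB (st : Nat × Option String × Option String) (ev : List (String × String)) :
    Nat × Option String × Option String :=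
  match pvKeyB ev with
  | none => st
  | some k =>
      (st.1 + 1,
       some (match st.2.1 with | none => k | some l => min l k),
       some (match st.2.2 with | none => k | some h => max h k))

def extract_date_range_from_evidences_py_alt (evidences : List (List (String × String))) : String :=
  let st := evidences.foldl pvStepB (0, none, none)
  if st.1 = 0 then "2024-2025"
  else if st.1 = 1 then st.2.1.getD ""
  else PySem.Str.join "" [st.2.1.getD "", " - ", st.2.2.getD ""]

-- ===== PRECONDITION & SPEC =====
def Spec_extract_date_range_from_evidences_py (evidences : List (List (String × String))) (out : String) : Prop := out = extract_date_range_from_evidences_py_alt evidences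
instance (evidences : List (List (String × String))) (out : String) : Decidable (Spec_extract_date_range_from_evidences_py evidences out) := by unfold Spec_extract_date_range_from_evidences_py; infer_instance

-- ===== CLAIM (what is proved, stated in full; the proofs are below) =====
def Claim_equal_extract_date_range_from_evidences_py : Prop := ∀ (evidences : List (List (String × String))), Dom_extract_date_range_from_evidences_py evidences → Spec_extract_date_range_from_evidences_py evidences (extract_date_range_from_evidences_py evidences)

-- ===== LEMMAS AND PROOFS =====

-- B's state as a function of A's collected list
def pvState (dates : List String) : Nat × Option String × Option String :=
  match dates with
  | [] => (0, none, none)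
  | x :: t => (t.length + 1, some (t.foldl min x), some (t.foldl max x))

theorem pvStepA_eq (dates : List String) (ev : List (String × String)) :
    pvStepA dates ev = dates ++ (pvKeyB ev).toList := by
  simp only [pvStepA, pvKeyB]
  split_ifs <;> try simp
  · cases PySem.Str.split? ((PySem.Dict.ofList ev).getD "protocol_date" "") "/" with
    | none => simp
    | some parts => by_cases h : parts.length = 3 <;> simp [h]
  · cases PySem.Str.split? ((PySem.Dict.ofList ev).getD "protocol_date" "") "-" with
    | none => simp
    | some parts => by_cases h : 2 ≤ parts.length <;> simp [h]

theorem pvStepB_state (dates : List String) (ev : List (String × String)) :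
    pvStepB (pvState dates) ev = pvState (dates ++ (pvKeyB ev).toList) := by
  cases hk : pvKeyB ev with
  | none => simp [pvStepB, hk]
  | some k =>
      cases dates with
      | nil => simp [pvStepB, hk, pvState]
      | cons x t => simp [pvStepB, hk, pvState, List.foldl_append]

theorem pvFold_state (evidences : List (List (String × String))) :
    ∀ dates : List String,
      evidences.foldl pvStepB (pvState dates) = pvState (evidences.foldl pvStepA dates) := by
  induction evidences with
  | nil => intro dates; rfl
  | cons ev rest ih =>
      intro dates
      simp only [List.foldl_cons, pvStepB_state, pvStepA_eq, ih]

theorem pvPairwise_le_getLast (l : List String) (h : l ≠ []) (hp : l.Pairwise (· ≤ ·)) :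
    ∀ y ∈ l, y ≤ l.getLast h := by
  induction l with
  | nil => exact absurd rfl h
  | cons x t ih =>
      intro y hy
      cases t with
      | nil => simp at hy; simp [hy]
      | cons a s =>
          rw [List.getLast_cons (by simp)]
          rcases List.mem_cons.mp hy with rfl | hy
          · exact le_trans (List.rel_of_pairwise_cons hp (by simp))
              (ih (by simp) (List.Pairwise.of_cons hp) _ (List.getLast_mem (by simp)))
          · exact ih (by simp) (List.Pairwise.of_cons hp) y hy

theorem pvSorted_head (x : String) (t : List String) :
    PySem.List.pyGetD (PySem.List.sorted (x :: t) (fun y => y) false) 0 "" = t.foldl min x := by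
  cases hs : PySem.List.sorted (x :: t) (fun y => y) false with
  | nil => exact absurd ((PySem.List.sorted_eq_nil_iff ..).mp hs) (by simp)
  | cons m rest =>
      rw [PySem.List.pyGetD_zero_cons]
      have hmem : m ∈ x :: t := (PySem.List.mem_sorted ..).mp (hs ▸ List.mem_cons_self ..)
      have hmin : ∀ y ∈ x :: t, m ≤ y := PySem.List.key_head_sorted_le _ _ hs
      have hf := PySem.List.foldl_min_le t x
      have hfm : t.foldl min x ∈ x :: t := by
        rcases PySem.List.foldl_min_mem t x with h | h
        · simp [h]
        · simp [h]
      refine le_antisymm (hmin _ hfm) ?_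
      rcases List.mem_cons.mp hmem with h | h
      · exact h ▸ hf.1
      · exact hf.2 m h

theorem pvSorted_last (x : String) (t : List String) :
    PySem.List.pyGetD (PySem.List.sorted (x :: t) (fun y => y) false) (-1) "" = t.foldl max x := by
  have hne : PySem.List.sorted (x :: t) (fun y => y) false ≠ [] := by
    intro h; exact absurd ((PySem.List.sorted_eq_nil_iff ..).mp h) (by simp)
  rw [PySem.List.pyGetD_neg_one _ _ hne]
  have hp : (PySem.List.sorted (x :: t) (fun y => y) false).Pairwise (· ≤ ·) := by
    have := PySem.List.sorted_pairwise (xs := x :: t) (key := fun y => y)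
    simpa using this
  have hlast := pvPairwise_le_getLast _ hne hp
  have hlm : (PySem.List.sorted (x :: t) (fun y => y) false).getLast hne ∈ x :: t :=
    (PySem.List.mem_sorted ..).mp (List.getLast_mem hne)
  have hf := PySem.List.le_foldl_max t x
  have hfm : t.foldl max x ∈ x :: t := by
    rcases PySem.List.foldl_max_mem t x with h | h
    · simp [h]
    · simp [h]
  refine le_antisymm ?_ ?_
  · rcases List.mem_cons.mp hlm with h | h
    · rw [h]; exact hf.1
    · exact hf.2 _ h
  · exact hlast _ ((PySem.List.mem_sorted ..).mpr hfm)

theorem pvLength_sorted (l : List String) :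
    (PySem.List.sorted l (fun y => y) false).length = l.length :=
  PySem.List.length_sorted ..

-- ===== VERDICT (by name: the statement is the Claim_ definition above) =====
theorem extract_date_range_from_evidences_py_spec : Claim_equal_extract_date_range_from_evidences_py := by
  intro evidences _
  unfold Spec_extract_date_range_from_evidences_py
  unfold extract_date_range_from_evidences_py extract_date_range_from_evidences_py_alt
  have hst : evidences.foldl pvStepB (0, none, none) = pvState (evidences.foldl pvStepA []) :=
    pvFold_state evidences []
  rw [hst]
  cases hd : evidences.foldl pvStepA [] with
  | nil => simp [pvState]
  | cons x t =>
      cases t with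
      | nil =>
          have h1 : PySem.List.sorted [x] (fun y => y) false = [x] :=
            PySem.List.sorted_eq_self_of_pairwise _ _ (by simp)
          simp [pvState, h1]
      | cons a s =>
          have hlen : (PySem.List.sorted (x :: a :: s) (fun y => y) false).length ≠ 1 := by
            rw [pvLength_sorted]; simp
          simp only [pvState, List.length_cons]
          rw [if_neg (by simp), if_neg hlen, if_neg (by simp), if_neg (by simp)]
          rw [pvSorted_head x (a :: s), pvSorted_last x (a :: s)]
          rfl
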